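-- pv_equiv track=rewrite | github.com/belongpy/phoenix-project | cielo_api.py | validate_wallet_address
-- ===== SOURCE A (Python) =====
-- def validate_wallet_address(wallet_address: str) -> bool:
--     """
--     Validate if a wallet address is properly formatted for Solana.
--
--     Args:
--         wallet_address (str): Wallet address to validate
--
--     Returns:
--         bool: True if valid, False otherwise
--     """
--     try:
--         # Basic Solana address validation
--         if not wallet_address or len(wallet_address) < 32 or len(wallet_address) > 44:
--             return False
--
--         # Check if it's a valid base58 string (Solana addresses are base58)
--         # Without base58 library, do basic character check
--         valid_chars = "123456789ABCDEFGHJKLMNPQRSTUVWXYZabcdefghijkmnopqrstuvwxyz"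
--         return all(c in valid_chars for c in wallet_address)
--
--     except Exception:
--         return False
-- ===== SOURCE B (Python) =====
-- import re
--
-- _SOLANA_RE = re.compile(r'[1-9A-HJ-NP-Za-km-z]{32,44}')
--
-- def validate_wallet_address(wallet_address: str) -> bool:
--     try:
--         return bool(_SOLANA_RE.fullmatch(wallet_address))
--     except Exception:
--         return False
-- ===== Notes on version B (the rewrite author's own statement) =====
-- stated objective: idiomatic
-- what changed: Replaces the explicit length guard plus all()-membership scan over a 58-character alphabet string with a single compiled-regex fullmatch whose character class encodes the base58 ranges and whose {32,44} quantifier enforces the length bounds.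
import Mathlib
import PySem

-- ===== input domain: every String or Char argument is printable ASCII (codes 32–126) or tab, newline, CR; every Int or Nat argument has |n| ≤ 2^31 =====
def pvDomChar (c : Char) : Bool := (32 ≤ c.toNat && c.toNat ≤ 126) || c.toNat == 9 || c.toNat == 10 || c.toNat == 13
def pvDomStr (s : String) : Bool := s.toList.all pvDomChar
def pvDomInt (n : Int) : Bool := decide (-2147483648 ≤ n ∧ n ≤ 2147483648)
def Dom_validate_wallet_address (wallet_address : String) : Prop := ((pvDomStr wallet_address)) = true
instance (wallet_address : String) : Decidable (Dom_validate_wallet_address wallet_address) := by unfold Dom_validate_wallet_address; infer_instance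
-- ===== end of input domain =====

-- B replaces A's length guard + all()-membership loop over a 58-char alphabet string
-- with one regex fullmatch r'[1-9A-HJ-NP-Za-km-z]{32,44}' (objective: idiomatic).

-- ===== PORT A =====
-- the base58 alphabet string 'valid_chars' of A
def pvValidChars : List Char :=
  "123456789ABCDEFGHJKLMNPQRSTUVWXYZabcdefghijkmnopqrstuvwxyz".toList

def validate_wallet_address (wallet_address : String) : Bool :=
  -- 'if not wallet_address or len(...) < 32 or len(...) > 44: return False'
  if wallet_address.toList.length = 0 ∨ wallet_address.toList.length < 32 ∨
     wallet_address.toList.length > 44 then false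
  -- 'return all(c in valid_chars for c in wallet_address)'  ('c in valid_chars' = char membership)
  else wallet_address.toList.all (fun c => pvValidChars.contains c)

-- ===== PORT B =====
-- regex character class [1-9A-HJ-NP-Za-km-z], exact: six code ranges
def pvB58Class (c : Char) : Bool :=
  ('1' ≤ c && c ≤ '9') || ('A' ≤ c && c ≤ 'H') || ('J' ≤ c && c ≤ 'N') ||
  ('P' ≤ c && c ≤ 'Z') || ('a' ≤ c && c ≤ 'k') || ('m' ≤ c && c ≤ 'z')

-- hand port of re.fullmatch(r'[class]{32,44}', s): consume chars matching the class,
-- counting them, refusing a 45th; at end of input the count must be ≥ 32 (≤ 44 is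
-- forced by the refusal). Exact for this pattern: nothing follows the quantifier,
-- so greedy matching with backtracking succeeds iff all chars match and 32 ≤ len ≤ 44.
def pvMatchB58 : List Char → Nat → Bool
  | [], n => decide (32 ≤ n)
  | c :: rest, n => if n = 44 then false else pvB58Class c && pvMatchB58 rest (n + 1)

def validate_wallet_address_alt (wallet_address : String) : Bool :=
  pvMatchB58 wallet_address.toList 0

-- ===== PRECONDITION & SPEC =====
def Spec_validate_wallet_address (wallet_address : String) (out : Bool) : Prop := out = validate_wallet_address_alt wallet_address
instance (wallet_address : String) (out : Bool) : Decidable (Spec_validate_wallet_address wallet_address out) := by unfold Spec_validate_wallet_address; infer_instance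

-- ===== CLAIM (what is proved, stated in full; the proofs are below) =====
def Claim_equal_validate_wallet_address : Prop := ∀ (wallet_address : String), Dom_validate_wallet_address wallet_address → Spec_validate_wallet_address wallet_address (validate_wallet_address wallet_address)

-- ===== LEMMAS AND PROOFS =====

-- membership in A's alphabet string coincides with B's character class
theorem pv_mem_class (c : Char) : pvValidChars.contains c = pvB58Class c := by
  have h : pvValidChars =
      ['1','2','3','4','5','6','7','8','9','A','B','C','D','E','F','G','H','J','K','L',
       'M','N','P','Q','R','S','T','U','V','W','X','Y','Z','a','b','c','d','e','f','g',
       'h','i','j','k','m','n','o','p','q','r','s','t','u','v','w','x','y','z'] := by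
    decide
  rw [h, Bool.eq_iff_iff]
  simp only [List.contains_eq_mem, List.mem_cons, List.not_mem_nil, or_false, pvB58Class,
    Char.le_def, Bool.or_eq_true, Bool.and_eq_true, decide_eq_true_iff,
    UInt32.le_iff_toNat_le, Char.ext_iff, UInt32.ext_iff]
  simp only [show ('1':Char).val.toNat = 49 from rfl, show ('2':Char).val.toNat = 50 from rfl, show ('3':Char).val.toNat = 51 from rfl, show ('4':Char).val.toNat = 52 from rfl, show ('5':Char).val.toNat = 53 from rfl, show ('6':Char).val.toNat = 54 from rfl, show ('7':Char).val.toNat = 55 from rfl, show ('8':Char).val.toNat = 56 from rfl, show ('9':Char).val.toNat = 57 from rfl, show ('A':Char).val.toNat = 65 from rfl, show ('B':Char).val.toNat = 66 from rfl, show ('C':Char).val.toNat = 67 from rfl, show ('D':Char).val.toNat = 68 from rfl, show ('E':Char).val.toNat = 69 from rfl, show ('F':Char).val.toNat = 70 from rfl, show ('G':Char).val.toNat = 71 from rfl, show ('H':Char).val.toNat = 72 from rfl, show ('J':Char).val.toNat = 74 from rfl, show ('K':Char).val.toNat = 75 from rfl, show ('L':Char).val.toNat = 76 from rfl, show ('M':Char).val.toNat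 = 77 from rfl, show ('N':Char).val.toNat = 78 from rfl, show ('P':Char).val.toNat = 80 from rfl, show ('Q':Char).val.toNat = 81 from rfl, show ('R':Char).val.toNat = 82 from rfl, show ('S':Char).val.toNat = 83 from rfl, show ('T':Char).val.toNat = 84 from rfl, show ('U':Char).val.toNat = 85 from rfl, show ('V':Char).val.toNat = 86 from rfl, show ('W':Char).val.toNat = 87 from rfl, show ('X':Char).val.toNat = 88 from rfl, show ('Y':Char).val.toNat = 89 from rfl, show ('Z':Char).val.toNat = 90 from rfl, show ('a':Char).val.toNat = 97 from rfl, show ('b':Char).val.toNat = 98 from rfl, show ('c':Char).val.toNat = 99 from rfl, show ('d':Char).val.toNat = 100 from rfl, show ('e':Char).val.toNat = 101 from rfl, show ('f':Char).val.toNat = 102 from rfl, show ('g':Char).val.toNat = 103 from rfl, show ('h':Char).val.toNat = 104 from rfl, show ('i':Char).val.toNat = 105 from rfl, show ('j':Char).val.toNat = 106 from rfl, show ('k':Char).val.toNat = 107 from rfl, show ('m':Char).val.toNat = 109 from rfl, show ('n':Char).val.toNat = 110 from rfl, show ('o':Char).val.toNat = 111 from rfl, show ('p':Char).val.toNat = 112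 from rfl, show ('q':Char).val.toNat = 113 from rfl, show ('r':Char).val.toNat = 114 from rfl, show ('s':Char).val.toNat = 115 from rfl, show ('t':Char).val.toNat = 116 from rfl, show ('u':Char).val.toNat = 117 from rfl, show ('v':Char).val.toNat = 118 from rfl, show ('w':Char).val.toNat = 119 from rfl, show ('x':Char).val.toNat = 120 from rfl, show ('y':Char).val.toNat = 121 from rfl, show ('z':Char).val.toNat = 122 from rfl]
  omega

-- characterisation of B's matcher (n is the count of chars consumed so far, never above 44)
theorem pvMatchB58_spec (l : List Char) (n : Nat) (hn : n ≤ 44) :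
    pvMatchB58 l n = (decide (32 ≤ n + l.length) && decide (n + l.length ≤ 44)
                        && l.all pvB58Class) := by
  induction l generalizing n with
  | nil =>
    by_cases h32 : 32 ≤ n <;> simp [pvMatchB58, h32, hn]
  | cons c rest ih =>
    simp only [pvMatchB58, List.length_cons, List.all_cons]
    by_cases h44 : n = 44
    · subst h44
      have : ¬ (44 + (rest.length + 1) ≤ 44) := by omega
      simp [this]
    · rw [if_neg h44, ih (n + 1) (by omega)]
      have harith : n + 1 + rest.length = n + (rest.length + 1) := by omega
      rw [harith]
      cases hc : pvB58Class c
      · simp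
      · rw [Bool.eq_iff_iff]
        simp [and_comm, and_left_comm]

-- ===== VERDICT (by name: the statement is the Claim_ definition above) =====
theorem validate_wallet_address_spec : Claim_equal_validate_wallet_address := by
  intro s _
  unfold Spec_validate_wallet_address validate_wallet_address validate_wallet_address_alt
  rw [pvMatchB58_spec _ _ (by omega)]
  have hf : (fun c => pvValidChars.contains c) = pvB58Class := funext pv_mem_class
  rw [hf]
  generalize s.toList = l
  split_ifs with h
  · have : ¬ (32 ≤ 0 + l.length) ∨ ¬ (0 + l.length ≤ 44) := by omega
    rcases this with h' | h' <;> simp <;> intro ha hb <;> exact (h' (by omega)).elim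
  · have h1 : 32 ≤ 0 + l.length := by omega
    have h2 : 0 + l.length ≤ 44 := by omega
    simp
    exact fun _ => ⟨by omega, by omega⟩
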